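-- pv_equiv track=rewrite | github.com/mrprashantkumar/LeetCode-Submissions-Python | 0712-minimum-ascii-delete-sum-for-two-strings/0712-minimum-ascii-delete-sum-for-two-strings.py | minimumDeleteSum
-- ===== SOURCE A (Python) =====
-- def minimumDeleteSum(s1: str, s2: str) -> int:
--     n, m = len(s1), len(s2)
--     dp = [[0]*(m+1) for _ in range(n+1)]
--
--     for i in range(n):
--         dp[i][m] = sum(ord(s1[k]) for k in range(i, n))
--     for j in range(m):
--         dp[n][j] = sum(ord(s2[k]) for k in range(j, m))
--     for i in range(n-1, -1, -1):
--         for j in range(m-1, -1, -1):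
--             if s1[i] == s2[j]:
--                 dp[i][j] = dp[i+1][j+1]
--             else:
--                 rems1 = ord(s1[i])+dp[i+1][j]
--                 rems2 = ord(s2[j])+dp[i][j+1]
--                 dp[i][j] = min(rems1, rems2)
--     return dp[0][0]
-- ===== SOURCE B (Python) =====
-- def minimumDeleteSum(s1: str, s2: str) -> int:
--     # Forward DP on prefixes: row[j] = max total ASCII weight of a common
--     # subsequence of the processed prefix of s1 and s2[:j], kept as one
--     # rolling row; answer = total ASCII weight minus twice the kept weight.
--     row = [0] * (len(s2) + 1)
--     for c1 in s1:
--         prev = 0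
--         new = [prev]
--         for c2, diag, up in zip(s2, row, row[1:]):
--             prev = diag + ord(c1) if c1 == c2 else max(up, prev)
--             new.append(prev)
--         row = new
--     return sum(map(ord, s1)) + sum(map(ord, s2)) - 2 * row[-1]
-- ===== Notes on version B (the rewrite author's own statement) =====
-- stated objective: faster
-- what changed: A fills a backward 2D suffix table of minimum delete sums plus quadratic per-row boundary suffix-sum loops; B runs a forward prefix DP with a single rolling row that maximizes the kept common-subsequence ASCII weight and returns total weight minus twice the kept weight.
import Mathlib
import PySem

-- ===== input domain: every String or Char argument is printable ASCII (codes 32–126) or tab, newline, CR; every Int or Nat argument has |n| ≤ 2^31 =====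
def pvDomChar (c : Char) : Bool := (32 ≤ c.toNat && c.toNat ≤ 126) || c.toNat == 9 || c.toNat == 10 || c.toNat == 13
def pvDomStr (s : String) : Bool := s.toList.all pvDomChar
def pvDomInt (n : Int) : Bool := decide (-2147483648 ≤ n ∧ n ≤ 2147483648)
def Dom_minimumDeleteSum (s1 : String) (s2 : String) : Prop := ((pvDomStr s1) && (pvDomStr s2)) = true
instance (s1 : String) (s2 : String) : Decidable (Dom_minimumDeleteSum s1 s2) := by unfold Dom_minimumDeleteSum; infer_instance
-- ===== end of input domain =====

-- B replaces A's backward min-delete 2D suffix table by a forward rolling-row DP for the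
-- maximum kept ASCII weight, returning total ASCII weight minus twice the kept weight
-- (measurably faster: one rolling row, no 2D table, no re-computed boundary suffix sums).

-- ===== PORT A =====
-- the list of ord codes of a string (ord(c) = c.toNat for every Char)
def pvCodes (s : String) : List Int := s.toList.map (fun c => (c.toNat : Int))

-- A's second boundary loop: dp[n][j] = sum(ord(s2[k]) for k in range(j, m)), j = 0..m
-- (entry m is the 0 left from the table initialisation)
def pa_baseRow (ys : List Int) : List Int :=
  (List.range (ys.length + 1)).map (fun j => (ys.drop j).sum)

-- A's inner loop (j from m-1 down to 0): builds row i from row i+1 (`next`);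
-- `last` is dp[i][m], the suffix sum A stored in its first boundary loop;
-- dp[i+1][j] is the head of `next`, dp[i+1][j+1] the head of its tail,
-- dp[i][j+1] the head of the already-built rest of row i.
def pa_inner (a : Int) : List Int → List Int → Int → List Int
  | b :: ys', n0 :: next', last =>
      let rest := pa_inner a ys' next' last
      (if a = b then next'.headI
       else min (a + n0) (b + rest.headI)) :: rest
  | _, _, last => [last]

-- A's outer loop (i from n-1 down to 0), one table row per suffix of s1
def pa_rows : List Int → List Int → List Int
  | [], ys => pa_baseRow ys
  | a :: xs', ys => pa_inner a ys (pa_rows xs' ys) ((a :: xs').sum)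

def minimumDeleteSum (s1 : String) (s2 : String) : Int :=
  (pa_rows (pvCodes s1) (pvCodes s2)).headI

-- ===== PORT B =====
-- B's inner loop: for c2, diag, up in zip(s2, row, row[1:]): prev := …; new.append(prev)
def pb_inner (a : Int) : List Int → List Int → List Int → Int → List Int
  | b :: ys', diag :: row', new, prev =>
      let prev' := if a = b then diag + a else max row'.headI prev
      pb_inner a ys' row' (new ++ [prev']) prev'
  | _, _, new, _ => new

-- one iteration of B's outer loop: new = [0]; prev = 0; inner loop; row = new
def pb_step (c2 : List Int) (row : List Int) (a : Int) : List Int :=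
  pb_inner a c2 row [0] 0

def minimumDeleteSum_alt (s1 : String) (s2 : String) : Int :=
  let c1 := pvCodes s1
  let c2 := pvCodes s2
  let row := c1.foldl (pb_step c2) (List.replicate (c2.length + 1) 0)
  c1.sum + c2.sum - 2 * row.getLastD 0

-- ===== PRECONDITION & SPEC =====
def Spec_minimumDeleteSum (s1 : String) (s2 : String) (out : Int) : Prop := out = minimumDeleteSum_alt s1 s2
instance (s1 : String) (s2 : String) (out : Int) : Decidable (Spec_minimumDeleteSum s1 s2 out) := by unfold Spec_minimumDeleteSum; infer_instance

-- ===== CLAIM (what is proved, stated in full; the proofs are below) =====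
def Claim_equal_minimumDeleteSum : Prop := ∀ (s1 : String) (s2 : String), Dom_minimumDeleteSum s1 s2 → Spec_minimumDeleteSum s1 s2 (minimumDeleteSum s1 s2)

-- ===== LEMMAS AND PROOFS =====

-- maximum total weight of a common subsequence (head recursion)
def mkW : List Int → List Int → Int
  | [], _ => 0
  | _, [] => 0
  | a :: xs, b :: ys =>
      if a = b then a + mkW xs ys
      else max (mkW xs (b :: ys)) (mkW (a :: xs) ys)
termination_by xs ys => xs.length + ys.length

-- minimum delete sum (head recursion) — the value A's table holds
def mdW : List Int → List Int → Int
  | [], ys => ys.sum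
  | xs, [] => xs.sum
  | a :: xs, b :: ys =>
      if a = b then mdW xs ys
      else min (a + mdW xs (b :: ys)) (b + mdW (a :: xs) ys)
termination_by xs ys => xs.length + ys.length

theorem mkW_nil_right (xs : List Int) : mkW xs [] = 0 := by
  cases xs <;> simp [mkW]

theorem mdW_nil_right (xs : List Int) : mdW xs [] = xs.sum := by
  cases xs <;> simp [mdW]

theorem mkW_single_left (a : Int) (ha : 0 ≤ a) :
    ∀ l : List Int, mkW [a] l = if a ∈ l then a else 0 := by
  intro l
  induction l with
  | nil => simp [mkW]
  | cons c l ih =>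
      by_cases h : a = c
      · subst h; simp [mkW]
      · simp only [mkW, if_neg h, ih]
        have h0 : (0:Int) ≤ if a ∈ l then a else 0 := by split <;> omega
        rw [max_eq_right h0]
        simp [List.mem_cons, h]

theorem mkW_single_right (b : Int) (hb : 0 ≤ b) :
    ∀ l : List Int, mkW l [b] = if b ∈ l then b else 0 := by
  intro l
  induction l with
  | nil => simp [mkW]
  | cons c l ih =>
      by_cases h : c = b
      · subst h; simp [mkW, mkW_nil_right]
      · simp only [mkW, if_neg h, mkW_nil_right, ih]
        have h0 : (0:Int) ≤ if b ∈ l then b else 0 := by split <;> omega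
        rw [max_eq_left h0]
        have h' : ¬ b = c := fun hh => h hh.symm
        simp [List.mem_cons, h']

-- the recurrence of mkW read at the BACK of both lists
theorem mkW_append (a b : Int) (ha : 0 ≤ a) (hb : 0 ≤ b) :
    ∀ xs : List Int, ∀ ys : List Int,
      mkW (xs ++ [a]) (ys ++ [b]) =
        if a = b then mkW xs ys + a
        else max (mkW (xs ++ [a]) ys) (mkW xs (ys ++ [b])) := by
  intro xs
  induction xs with
  | nil =>
      intro ys
      rw [List.nil_append, mkW_single_left a ha, mkW_single_left a ha]
      rw [show mkW ([] : List Int) (ys ++ [b]) = 0 from by simp [mkW],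
          show mkW ([] : List Int) ys = 0 from by simp [mkW]]
      by_cases hab : a = b
      · subst hab; simp
      · rw [if_neg hab]
        have h0 : (0:Int) ≤ if a ∈ ys then a else 0 := by split <;> omega
        rw [max_eq_left h0]
        simp [List.mem_append, hab]
  | cons x xs ihx =>
      intro ys
      induction ys with
      | nil =>
          rw [List.nil_append, mkW_single_right b hb, mkW_single_right b hb,
              mkW_nil_right (x :: xs), mkW_nil_right ((x :: xs) ++ [a])]
          by_cases hab : a = b
          · subst hab; simp
          · rw [if_neg hab]
            have h0 : (0:Int) ≤ if b ∈ x :: xs then b else 0 := by split <;> omega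
            rw [max_eq_right h0]
            have h' : ¬ b = a := fun hh => hab hh.symm
            simp [List.mem_append, h']
      | cons y ys ihy =>
          have hxa : (x :: xs) ++ [a] = x :: (xs ++ [a]) := rfl
          have hyb : (y :: ys) ++ [b] = y :: (ys ++ [b]) := rfl
          by_cases hxy : x = y
          · subst hxy
            rw [hxa, hyb]
            rw [show mkW (x :: (xs ++ [a])) (x :: (ys ++ [b]))
                  = x + mkW (xs ++ [a]) (ys ++ [b]) from by simp [mkW]]
            rw [ihx ys]
            by_cases hab : a = b
            · rw [if_pos hab, if_pos hab]
              rw [show mkW (x :: xs) (x :: ys) = x + mkW xs ys from by simp [mkW]]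
              ring
            · rw [if_neg hab, if_neg hab]
              rw [show mkW (x :: (xs ++ [a])) (x :: ys)
                    = x + mkW (xs ++ [a]) ys from by simp [mkW]]
              rw [show mkW (x :: xs) (x :: (ys ++ [b]))
                    = x + mkW xs (ys ++ [b]) from by simp [mkW]]
              rw [max_add_add_left]
          · rw [hxa, hyb]
            rw [show mkW (x :: (xs ++ [a])) (y :: (ys ++ [b]))
                  = max (mkW (xs ++ [a]) (y :: (ys ++ [b])))
                        (mkW (x :: (xs ++ [a])) (ys ++ [b])) from by
                  rw [mkW]; simp [hxy]]
            rw [show (y : Int) :: (ys ++ [b]) = (y :: ys) ++ [b] from rfl]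
            rw [show (x : Int) :: (xs ++ [a]) = (x :: xs) ++ [a] from rfl]
            rw [ihx (y :: ys), ihy]
            by_cases hab : a = b
            · rw [if_pos hab, if_pos hab, if_pos hab]
              rw [show mkW (x :: xs) (y :: ys)
                    = max (mkW xs (y :: ys)) (mkW (x :: xs) ys) from by
                    rw [mkW]; simp [hxy]]
              rw [max_add_add_right]
            · rw [if_neg hab, if_neg hab, if_neg hab]
              rw [show mkW ((x :: xs) ++ [a]) (y :: ys)
                    = max (mkW (xs ++ [a]) (y :: ys)) (mkW ((x :: xs) ++ [a]) ys) from by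
                    rw [show (x :: xs) ++ [a] = x :: (xs ++ [a]) from rfl, mkW]
                    simp [hxy]]
              rw [show mkW (x :: xs) ((y :: ys) ++ [b])
                    = max (mkW xs ((y :: ys) ++ [b])) (mkW (x :: xs) (ys ++ [b])) from by
                    rw [show (y :: ys) ++ [b] = y :: (ys ++ [b]) from rfl, mkW]
                    simp [hxy]]
              rw [max_max_max_comm]

-- mkW is invariant under reversing both lists
theorem mkW_reverse :
    ∀ xs ys : List Int, (∀ x ∈ xs, 0 ≤ x) → (∀ y ∈ ys, 0 ≤ y) →
      mkW xs.reverse ys.reverse = mkW xs ys := by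
  intro xs
  induction xs with
  | nil => intro ys _ _; simp [mkW]
  | cons x xs ihx =>
      intro ys
      induction ys with
      | nil => intro _ _; simp [mkW_nil_right]
      | cons y ys ihy =>
          intro hx hy
          have hx' : ∀ z ∈ xs, (0:Int) ≤ z := fun z hz => hx z (List.mem_cons_of_mem _ hz)
          have hy' : ∀ z ∈ ys, (0:Int) ≤ z := fun z hz => hy z (List.mem_cons_of_mem _ hz)
          have h0x : (0:Int) ≤ x := hx x List.mem_cons_self
          have h0y : (0:Int) ≤ y := hy y List.mem_cons_self
          rw [List.reverse_cons, List.reverse_cons, mkW_append x y h0x h0y]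
          by_cases hxy : x = y
          · subst hxy
            rw [ihx ys hx' hy']
            simp [mkW, add_comm]
          · rw [show (xs.reverse ++ [x]) = (x :: xs).reverse from by simp,
                show (ys.reverse ++ [y]) = (y :: ys).reverse from by simp]
            rw [ihy hx hy', ihx (y :: ys) hx' hy]
            rw [show mkW (x :: xs) (y :: ys)
                  = max (mkW xs (y :: ys)) (mkW (x :: xs) ys) from by
                  rw [mkW]; simp [hxy]]
            simp [hxy, max_comm]

-- min delete sum = total − 2 · max kept weight
theorem mdW_eq (xs : List Int) : ∀ ys : List Int,
    mdW xs ys = xs.sum + ys.sum - 2 * mkW xs ys := by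
  induction xs with
  | nil => intro ys; simp [mdW, mkW]
  | cons x xs ihx =>
      intro ys
      induction ys with
      | nil => simp [mdW_nil_right, mkW_nil_right]
      | cons y ys ihy =>
          by_cases hxy : x = y
          · subst hxy
            rw [show mdW (x :: xs) (x :: ys) = mdW xs ys from by simp [mdW],
                show mkW (x :: xs) (x :: ys) = x + mkW xs ys from by simp [mkW],
                ihx ys]
            simp; ring
          · rw [show mdW (x :: xs) (y :: ys)
                  = min (x + mdW xs (y :: ys)) (y + mdW (x :: xs) ys) from by
                  rw [mdW]; simp [hxy],
                show mkW (x :: xs) (y :: ys)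
                  = max (mkW xs (y :: ys)) (mkW (x :: xs) ys) from by
                  rw [mkW]; simp [hxy],
                ihx (y :: ys), ihy]
            simp only [List.sum_cons]
            rcases le_total (mkW xs (y :: ys)) (mkW (x :: xs) ys) with h | h
            · rw [max_eq_right h, min_eq_right (by omega)]; ring
            · rw [max_eq_left h, min_eq_left (by omega)]; ring

-- ---- characterisation of port A ----

-- row i of A's table: entry j is mdW (suffix of s1) (suffix of s2 from j)
def rowOf (xs : List Int) : List Int → List Int
  | [] => [mdW xs []]
  | b :: ys => mdW xs (b :: ys) :: rowOf xs ys

theorem rowOf_headI (xs ys : List Int) : (rowOf xs ys).headI = mdW xs ys := by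
  cases ys <;> simp [rowOf]

theorem pa_baseRow_eq (ys : List Int) : pa_baseRow ys = rowOf [] ys := by
  induction ys with
  | nil => simp [pa_baseRow, List.range_succ, rowOf, mdW]
  | cons b ys ih =>
      rw [pa_baseRow, List.range_succ_eq_map, List.map_cons, List.map_map]
      rw [rowOf, ← ih, pa_baseRow]
      simp [mdW, Function.comp_def]

theorem pa_inner_eq (a : Int) (xs : List Int) :
    ∀ ys : List Int, pa_inner a ys (rowOf xs ys) ((a :: xs).sum) = rowOf (a :: xs) ys := by
  intro ys
  induction ys with
  | nil => simp [rowOf, pa_inner, mdW_nil_right]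
  | cons b ys ih =>
      rw [show rowOf xs (b :: ys) = mdW xs (b :: ys) :: rowOf xs ys from rfl]
      rw [pa_inner]
      rw [ih, rowOf_headI, rowOf_headI]
      rw [show rowOf (a :: xs) (b :: ys) = mdW (a :: xs) (b :: ys) :: rowOf (a :: xs) ys from rfl]
      by_cases hab : a = b
      · subst hab; simp [mdW]
      · rw [show mdW (a :: xs) (b :: ys)
              = min (a + mdW xs (b :: ys)) (b + mdW (a :: xs) ys) from by
              rw [mdW]; simp [hab]]
        simp [hab]

theorem pa_rows_eq (xs ys : List Int) : pa_rows xs ys = rowOf xs ys := by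
  induction xs with
  | nil => simpa [pa_rows] using pa_baseRow_eq ys
  | cons a xs ih => rw [pa_rows, ih, pa_inner_eq]

theorem portA_eq (s1 s2 : String) :
    minimumDeleteSum s1 s2 = mdW (pvCodes s1) (pvCodes s2) := by
  rw [minimumDeleteSum, pa_rows_eq, rowOf_headI]

-- ---- characterisation of port B ----

-- B's row for the reversed processed prefix xr of s1: entry j is
-- mkW xr (reversed prefix of s2 of length j, on top of w)
def tailR (xr : List Int) : List Int → List Int → List Int
  | _, [] => []
  | w, b :: ys => mkW xr (b :: w) :: tailR xr (b :: w) ys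
termination_by _ ys => ys.length

def rowR (xr w ys : List Int) : List Int := mkW xr w :: tailR xr w ys

theorem rowR_headI (xr w ys : List Int) : (rowR xr w ys).headI = mkW xr w := rfl

theorem pb_inner_eq (a : Int) (xr : List Int) :
    ∀ ys w new : List Int,
      pb_inner a ys (rowR xr w ys) new (mkW (a :: xr) w) = new ++ tailR (a :: xr) w ys := by
  intro ys
  induction ys with
  | nil => intro w new; simp [tailR, pb_inner]
  | cons b ys ih =>
      intro w new
      rw [show rowR xr w (b :: ys) = mkW xr w :: rowR xr (b :: w) ys from by
            simp [rowR, tailR]]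
      rw [pb_inner]
      have hstep : (if a = b then mkW xr w + a else max (rowR xr (b :: w) ys).headI (mkW (a :: xr) w))
          = mkW (a :: xr) (b :: w) := by
        rw [rowR_headI]
        by_cases hab : a = b
        · simp [mkW, hab, add_comm]
        · rw [show mkW (a :: xr) (b :: w)
                = max (mkW xr (b :: w)) (mkW (a :: xr) w) from by
                rw [mkW]; simp [hab]]
          simp [hab]
      rw [hstep, ih (b :: w) (new ++ [mkW (a :: xr) (b :: w)])]
      simp [tailR]

theorem pb_step_eq (c2 : List Int) (xr : List Int) (a : Int) :
    pb_step c2 (rowR xr [] c2) a = rowR (a :: xr) [] c2 := by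
  rw [pb_step]
  have h0 : (0 : Int) = mkW (a :: xr) [] := by rw [mkW_nil_right]
  rw [show pb_inner a c2 (rowR xr [] c2) [0] 0
        = pb_inner a c2 (rowR xr [] c2) [mkW (a :: xr) []] (mkW (a :: xr) []) from by
        rw [← h0]]
  rw [pb_inner_eq a xr c2 [] [mkW (a :: xr) []]]
  simp [rowR]

theorem rowR_init (ys : List Int) :
    List.replicate (ys.length + 1) (0 : Int) = rowR [] [] ys := by
  suffices h : ∀ w : List Int, List.replicate ys.length (0 : Int) = tailR [] w ys by
    simpa [rowR, mkW, List.replicate_succ] using h []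
  induction ys with
  | nil => intro w; simp [tailR]
  | cons b ys ih => intro w; simp [tailR, mkW, List.replicate_succ, ih (b :: w)]

theorem pb_foldl (c2 : List Int) :
    ∀ l xr : List Int, l.foldl (pb_step c2) (rowR xr [] c2) = rowR (l.reverse ++ xr) [] c2 := by
  intro l
  induction l with
  | nil => intro xr; simp
  | cons a l ih =>
      intro xr
      rw [List.foldl_cons, pb_step_eq, ih (a :: xr)]
      simp

theorem rowR_getLastD (xr : List Int) :
    ∀ ys w : List Int, ∀ d : Int, (rowR xr w ys).getLastD d = mkW xr (ys.reverse ++ w) := by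
  intro ys
  induction ys with
  | nil => intro w d; simp [rowR, tailR]
  | cons b ys ih =>
      intro w d
      rw [show rowR xr w (b :: ys) = mkW xr w :: rowR xr (b :: w) ys from by
            simp [rowR, tailR]]
      rw [List.getLastD_cons, ih (b :: w)]
      simp

theorem pvCodes_nonneg (s : String) : ∀ x ∈ pvCodes s, (0 : Int) ≤ x := by
  intro x hx
  simp only [pvCodes, List.mem_map] at hx
  obtain ⟨c, _, rfl⟩ := hx
  exact Int.natCast_nonneg _

theorem portB_eq (s1 s2 : String) :
    minimumDeleteSum_alt s1 s2
      = (pvCodes s1).sum + (pvCodes s2).sum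
        - 2 * mkW (pvCodes s1).reverse (pvCodes s2).reverse := by
  rw [minimumDeleteSum_alt]
  rw [rowR_init, pb_foldl (pvCodes s2) (pvCodes s1) [], rowR_getLastD]
  simp

-- ===== VERDICT (by name: the statement is the Claim_ definition above) =====
theorem minimumDeleteSum_spec : Claim_equal_minimumDeleteSum := by
  intro s1 s2 _
  show minimumDeleteSum s1 s2 = minimumDeleteSum_alt s1 s2
  rw [portA_eq, portB_eq, mdW_eq,
      mkW_reverse (pvCodes s1) (pvCodes s2) (pvCodes_nonneg s1) (pvCodes_nonneg s2)]
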